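-- pv_equiv track=rewrite | github.com/MrBrantCode/unitest_baseline | mut_generate/mist_train_taco/taco_3432/solution.py | can_print_string_in_tour
-- ===== SOURCE A (Python) =====
-- def can_print_string_in_tour(s: str) -> str:
--     place = 'R'
--     for char in s:
--         if place == 'R':
--             if char == '1':
--                 place = 'B'
--         elif place == 'B':
--             if char == '0':
--                 place = 'Y'
--         elif place == 'Y':
--             if char == '1':
--                 place = 'B'
--             elif char == '0':
--                 place = 'P'
--         elif place == 'P':
--             if char == '1':
--                 place = 'B'
--             elif char == '0':
--                 place = 'G'
--         elif place == 'G':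
--             if char == '1':
--                 place = 'B'
--             elif char == '0':
--                 place = 'R'
--     if place == 'G':
--         return 'YES'
--     else:
--         return 'NO'
-- ===== SOURCE B (Python) =====
-- def can_print_string_in_tour(s: str) -> str:
--     t = ''.join(c for c in s if c in '01')
--     return 'YES' if t.endswith('1000') else 'NO'
-- ===== Notes on version B (the rewrite author's own statement) =====
-- stated objective: simpler
-- what changed: Replaced the per-character 5-state machine with a closed-form test: filter the string to its '0'/'1' characters and accept iff that binary subsequence ends with '1000'.
import Mathlib
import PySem

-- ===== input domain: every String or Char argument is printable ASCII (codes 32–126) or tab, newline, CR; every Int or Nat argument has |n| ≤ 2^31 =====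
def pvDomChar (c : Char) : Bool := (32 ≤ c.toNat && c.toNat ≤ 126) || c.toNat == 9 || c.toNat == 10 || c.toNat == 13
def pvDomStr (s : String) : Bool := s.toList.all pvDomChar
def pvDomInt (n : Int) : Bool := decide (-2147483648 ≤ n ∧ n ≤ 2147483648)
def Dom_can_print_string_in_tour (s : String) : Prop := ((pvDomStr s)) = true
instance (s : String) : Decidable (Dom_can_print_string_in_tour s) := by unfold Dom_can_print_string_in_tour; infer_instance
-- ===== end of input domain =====

-- B replaces A's per-character 5-state machine by a closed-form suffix test on the
-- binary-filtered string (objective: simpler).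

-- ===== PORT A =====
-- the loop body of A: one state transition of the machine
def pvStepA (place : Char) (char : Char) : Char :=
  if place = 'R' then (if char = '1' then 'B' else place)
  else if place = 'B' then (if char = '0' then 'Y' else place)
  else if place = 'Y' then (if char = '1' then 'B' else if char = '0' then 'P' else place)
  else if place = 'P' then (if char = '1' then 'B' else if char = '0' then 'G' else place)
  else if place = 'G' then (if char = '1' then 'B' else if char = '0' then 'R' else place)
  else place

def can_print_string_in_tour (s : String) : String :=
  let place := s.toList.foldl pvStepA 'R'
  if place = 'G' then "YES" else "NO"

-- ===== PORT B =====
def can_print_string_in_tour_alt (s : String) : String :=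
  -- t = ''.join(c for c in s if c in '01'); 'c in "01"' ported with PySem.Chars.isIn
  let t : List Char := s.toList.filter (fun c => PySem.Chars.isIn [c] ['0', '1'])
  if PySem.Chars.endswith t ['1', '0', '0', '0'] then "YES" else "NO"

-- ===== PRECONDITION & SPEC =====
def Spec_can_print_string_in_tour (s : String) (out : String) : Prop := out = can_print_string_in_tour_alt s
instance (s : String) (out : String) : Decidable (Spec_can_print_string_in_tour s out) := by unfold Spec_can_print_string_in_tour; infer_instance

-- ===== CLAIM (what is proved, stated in full; the proofs are below) =====
def Claim_equal_can_print_string_in_tour : Prop := ∀ (s : String), Dom_can_print_string_in_tour s → Spec_can_print_string_in_tour s (can_print_string_in_tour s)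

-- ===== LEMMAS AND PROOFS =====

-- 'c in "01"' on a single character is membership in ['0','1']
theorem pvIsIn_binary (c : Char) :
    PySem.Chars.isIn [c] ['0', '1'] = true ↔ (c = '0' ∨ c = '1') := by
  rw [PySem.Chars.isIn_iff_infix]
  constructor
  · intro h
    have hm : c ∈ (['0', '1'] : List Char) := h.sublist.subset (by simp)
    simpa using hm
  · rintro (rfl | rfl)
    · exact ⟨[], ['1'], rfl⟩
    · exact ⟨['0'], [], rfl⟩

-- non-binary characters leave the state unchanged
theorem pvStepA_skip (st c : Char) (h0 : c ≠ '0') (h1 : c ≠ '1') : pvStepA st c = st := by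
  unfold pvStepA
  simp [h0, h1]

-- the fold over s equals the fold over its binary-filtered sublist
theorem pvFoldl_filter (l : List Char) : ∀ st : Char,
    l.foldl pvStepA st = (l.filter (fun c => PySem.Chars.isIn [c] ['0', '1'])).foldl pvStepA st := by
  induction l with
  | nil => intro st; rfl
  | cons c l ih =>
    intro st
    by_cases hc : PySem.Chars.isIn [c] ['0', '1'] = true
    · simp [List.foldl_cons, hc, ih]
    · have := (not_iff_not.mpr (pvIsIn_binary c)).mp hc
      push Not at this
      simp [List.foldl_cons, hc, pvStepA_skip st c this.1 this.2, ih]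

-- state of the machine as a function of the REVERSED input list
def pvRstate : List Char → Char
  | [] => 'R'
  | c :: r =>
    let prev := pvRstate r
    if c = '1' then 'B'
    else if c = '0' then
      (if prev = 'B' then 'Y' else if prev = 'Y' then 'P' else if prev = 'P' then 'G' else 'R')
    else prev

theorem pvRstate_range (r : List Char) :
    pvRstate r = 'R' ∨ pvRstate r = 'B' ∨ pvRstate r = 'Y' ∨ pvRstate r = 'P' ∨ pvRstate r = 'G' := by
  induction r with
  | nil => simp [pvRstate]
  | cons c r ih =>
    simp only [pvRstate]
    split_ifs <;> simp [ih]

theorem pvFoldl_eq_rstate (r : List Char) :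
    List.foldl pvStepA 'R' r.reverse = pvRstate r := by
  induction r with
  | nil => rfl
  | cons c r ih =>
    rw [List.reverse_cons, List.foldl_append, ih]
    simp only [List.foldl_cons, List.foldl_nil, pvRstate]
    rcases pvRstate_range r with h | h | h | h | h <;> rw [h] <;> unfold pvStepA <;>
      split_ifs <;> simp_all

theorem pvRstate_eq_G_iff (r : List Char) (hb : ∀ c ∈ r, c = '0' ∨ c = '1') :
    pvRstate r = 'G' ↔ ['0', '0', '0', '1'] <+: r := by
  constructor
  · intro hG
    match r, hb with
    | [], _ => simp [pvRstate] at hG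
    | [c1], hb =>
      rcases hb c1 (by simp) with rfl | rfl <;> simp [pvRstate] at hG
    | [c1, c2], hb =>
      rcases hb c1 (by simp) with rfl | rfl <;> rcases hb c2 (by simp) with rfl | rfl <;>
        simp [pvRstate] at hG
    | [c1, c2, c3], hb =>
      rcases hb c1 (by simp) with rfl | rfl <;> rcases hb c2 (by simp) with rfl | rfl <;>
        rcases hb c3 (by simp) with rfl | rfl <;> simp [pvRstate] at hG
    | c1 :: c2 :: c3 :: c4 :: rest, hb =>
      rcases hb c1 (by simp) with rfl | rfl <;> rcases hb c2 (by simp) with rfl | rfl <;>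
        rcases hb c3 (by simp) with rfl | rfl <;> rcases hb c4 (by simp) with rfl | rfl <;>
        first
          | (exact ⟨rest, rfl⟩)
          | (exfalso
             rcases pvRstate_range rest with h | h | h | h | h <;> simp [pvRstate, h] at hG)
  · rintro ⟨rest, rfl⟩
    simp [pvRstate]

-- ===== VERDICT (by name: the statement is the Claim_ definition above) =====
theorem can_print_string_in_tour_spec : Claim_equal_can_print_string_in_tour := by
  intro s _
  unfold Spec_can_print_string_in_tour can_print_string_in_tour can_print_string_in_tour_alt
  set t : List Char := s.toList.filter (fun c => PySem.Chars.isIn [c] ['0', '1']) with ht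
  have hb : ∀ c ∈ t.reverse, c = '0' ∨ c = '1' := by
    intro c hc
    rw [List.mem_reverse, ht, List.mem_filter] at hc
    exact (pvIsIn_binary c).mp hc.2
  have hfold : s.toList.foldl pvStepA 'R' = pvRstate t.reverse := by
    rw [pvFoldl_filter, ← ht, ← pvFoldl_eq_rstate t.reverse, List.reverse_reverse]
  have hiff : (s.toList.foldl pvStepA 'R' = 'G') ↔ PySem.Chars.endswith t ['1', '0', '0', '0'] = true := by
    rw [hfold, pvRstate_eq_G_iff t.reverse hb, PySem.Chars.endswith_iff]
    constructor
    · intro h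
      have : (['0', '0', '0', '1'] : List Char).reverse <:+ t.reverse.reverse :=
        List.reverse_suffix.mpr h
      simpa using this
    · intro h
      have : (['1', '0', '0', '0'] : List Char).reverse <+: t.reverse :=
        List.reverse_prefix.mpr h
      simpa using this
  by_cases hG : s.toList.foldl pvStepA 'R' = 'G'
  · simp [hG, hiff.mp hG]
  · have : ¬ PySem.Chars.endswith t ['1', '0', '0', '0'] = true := fun h => hG (hiff.mpr h)
    simp [hG, this]
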